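-- pv_equiv track=rewrite | github.com/shubhomoydas/ad_examples | python/aad/plot_class_diversity.py | iter_by_window
-- ===== SOURCE A (Python) =====
-- def iter_by_window(x, window_indexes=None):
--     if window_indexes is None:
--         yield x
--         return
--     if len(x) > len(window_indexes):
--         raise ValueError("len(x) (%d) must be smaller or equal to length of window indexes (%d)" % (len(x), len(window_indexes)))
--     start = 0
--     n = len(x)
--     while start < n:
--         id = window_indexes[start]
--         end = start + 1
--         while end < n and window_indexes[end] == id:
--             end += 1
--         yield x[start:end]
--         start = end
-- ===== SOURCE B (Python) =====
-- def iter_by_window(x, window_indexes=None):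
--     if window_indexes is None:
--         yield x
--         return
--     n = len(x)
--     if n > len(window_indexes):
--         raise ValueError("len(x) (%d) must be smaller or equal to length of window indexes (%d)" % (n, len(window_indexes)))
--     if n == 0:
--         return
--     # staged: first compute all boundary positions, then slice between consecutive boundaries
--     bounds = [0] + [i for i in range(1, n) if window_indexes[i] != window_indexes[i - 1]] + [n]
--     for lo, hi in zip(bounds, bounds[1:]):
--         yield x[lo:hi]
-- ===== Notes on version B (the rewrite author's own statement) =====
-- stated objective: alternative
-- what changed: B is staged: one pass computes the list of boundary positions where adjacent window indexes differ, then a second pass slices x between consecutive boundaries, replacing A's nested run-scanning while loops.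
import Mathlib
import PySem

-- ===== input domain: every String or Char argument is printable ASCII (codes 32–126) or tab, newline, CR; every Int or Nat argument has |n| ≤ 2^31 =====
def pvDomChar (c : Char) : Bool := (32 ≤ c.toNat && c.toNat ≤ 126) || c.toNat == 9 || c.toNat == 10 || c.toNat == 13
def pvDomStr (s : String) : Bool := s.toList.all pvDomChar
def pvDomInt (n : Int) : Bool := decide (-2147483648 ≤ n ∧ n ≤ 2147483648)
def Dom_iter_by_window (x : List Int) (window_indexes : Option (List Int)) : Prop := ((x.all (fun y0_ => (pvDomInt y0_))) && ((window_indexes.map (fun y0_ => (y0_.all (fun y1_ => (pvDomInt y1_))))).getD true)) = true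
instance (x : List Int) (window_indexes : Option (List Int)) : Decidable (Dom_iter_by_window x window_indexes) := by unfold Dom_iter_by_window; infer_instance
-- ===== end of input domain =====

-- B is staged: first compute the boundary positions where adjacent window indexes differ,
-- then slice x between consecutive boundaries — replacing A's nested run-scanning loops
-- (an alternative decomposition, same cost). Both raise ValueError when
-- len(x) > len(window_indexes); Pre_ excludes exactly that.

-- ===== PORT A =====
-- inner while: `while end < n and window_indexes[end] == id: end += 1`
-- (indexes are in range under Pre_, so getD is exact)
def pyA_inner (wi : List Int) (n : Nat) (id : Int) (e : Nat) : Nat :=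
  if h : e < n ∧ wi.getD e 0 = id then pyA_inner wi n id (e + 1) else e
termination_by n - e
decreasing_by omega

-- needed only for pyA_loop's termination measure
theorem pyA_inner_ge (wi : List Int) (n : Nat) (id : Int) (e : Nat) : e ≤ pyA_inner wi n id e := by
  unfold pyA_inner
  split
  · exact le_trans (Nat.le_succ e) (pyA_inner_ge wi n id (e + 1))
  · exact le_refl e
termination_by n - e
decreasing_by omega

-- outer while of A
def pyA_loop (x : List Int) (wi : List Int) (n : Nat) (start : Nat) : List (List Int) :=
  if h : start < n then
    PySem.List.slice x (some (start : Int))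
        (some ((pyA_inner wi n (wi.getD start 0) (start + 1) : Nat) : Int))
      :: pyA_loop x wi n (pyA_inner wi n (wi.getD start 0) (start + 1))
  else []
termination_by n - start
decreasing_by
  have := pyA_inner_ge wi n (wi.getD start 0) (start + 1)
  omega

def iter_by_window (x : List Int) (window_indexes : Option (List Int)) : List (List Int) :=
  match window_indexes with
  | none => [x]
  | some wi =>
    if x.length > wi.length then []  -- Python raises ValueError here; excluded by Pre_
    else pyA_loop x wi x.length 0

-- ===== PORT B =====
-- boundary test: window_indexes[i] != window_indexes[i-1]
def bP (wi : List Int) (i : Nat) : Bool := wi.getD i 0 != wi.getD (i - 1) 0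

-- [i for i in range(1, n) if window_indexes[i] != window_indexes[i-1]]
def bBounds (wi : List Int) (n : Nat) : List Nat := (List.range' 1 (n - 1)).filter (bP wi)

-- for lo, hi in zip(bounds, bounds[1:]): yield x[lo:hi]
def bSlices (x : List Int) : List Nat → List (List Int)
  | lo :: hi :: rest => PySem.List.slice x (some (lo : Int)) (some (hi : Int)) :: bSlices x (hi :: rest)
  | _ => []

def iter_by_window_alt (x : List Int) (window_indexes : Option (List Int)) : List (List Int) :=
  match window_indexes with
  | none => [x]
  | some wi =>
    if x.length > wi.length then []  -- Python raises ValueError here; excluded by Pre_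
    else if x.length = 0 then []
    else bSlices x (0 :: bBounds wi x.length ++ [x.length])

-- ===== PRECONDITION & SPEC =====
-- Pre_ excludes exactly the inputs where Python A (and B) raise ValueError: len(x) > len(window_indexes).
def Pre_iter_by_window (x : List Int) (window_indexes : Option (List Int)) : Prop :=
  ∀ wi ∈ window_indexes, x.length ≤ wi.length
instance (x : List Int) (window_indexes : Option (List Int)) : Decidable (Pre_iter_by_window x window_indexes) := by unfold Pre_iter_by_window; infer_instance

def pvWitness_iter_by_window : List Int × Option (List Int) := ([1, 2, 3, 4], some [0, 0, 1, 2])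

def Spec_iter_by_window (x : List Int) (window_indexes : Option (List Int)) (out : List (List Int)) : Prop := out = iter_by_window_alt x window_indexes
instance (x : List Int) (window_indexes : Option (List Int)) (out : List (List Int)) : Decidable (Spec_iter_by_window x window_indexes out) := by unfold Spec_iter_by_window; infer_instance

-- ===== CLAIM =====
def Claim_equal_iter_by_window : Prop := ∀ (x : List Int) (window_indexes : Option (List Int)), Dom_iter_by_window x window_indexes → Pre_iter_by_window x window_indexes → Spec_iter_by_window x window_indexes (iter_by_window x window_indexes)

-- ===== LEMMAS AND PROOFS =====

-- A's inner while starting at e (with wi[e-1] = id and wi[start..e-1] all = id) stops at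
-- the first boundary position ≥ e, or at n.
theorem innerB (wi : List Int) (n : Nat) (id : Int) (e : Nat)
    (h1 : 1 ≤ e) (h2 : e ≤ n) (hid : wi.getD (e - 1) 0 = id) :
    pyA_inner wi n id e = (((List.range' e (n - e)).filter (bP wi)).headD n) := by
  unfold pyA_inner
  by_cases hc : e < n ∧ wi.getD e 0 = id
  · rw [dif_pos hc]
    have hrng : List.range' e (n - e) = e :: List.range' (e + 1) (n - (e + 1)) := by
      have : n - e = (n - (e + 1)) + 1 := by omega
      rw [this, List.range'_succ]
    have hP : bP wi e = false := by
      simp only [bP, bne_eq_false_iff_eq]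
      show wi.getD e 0 = wi.getD (e - 1) 0
      rw [hid, hc.2]
    rw [hrng, List.filter_cons, hP]
    simp only [Bool.false_eq_true, if_false]
    exact innerB wi n id (e + 1) (by omega) (by omega) (by simpa using hc.2)
  · rw [dif_neg hc]
    by_cases hlt : e < n
    · have hne : wi.getD e 0 ≠ id := by tauto
      have hrng : List.range' e (n - e) = e :: List.range' (e + 1) (n - (e + 1)) := by
        have : n - e = (n - (e + 1)) + 1 := by omega
        rw [this, List.range'_succ]
      have hP : bP wi e = true := by
        simp only [bP, bne_iff_ne]
        show wi.getD e 0 ≠ wi.getD (e - 1) 0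
        rw [hid]; exact hne
      rw [hrng, List.filter_cons, hP]
      simp
    · have he : e = n := by omega
      subst he
      simp
termination_by n - e
decreasing_by omega

-- if the first kept element of a filtered increasing range is h, the rest of the filter
-- is the filter of the range after h
theorem filter_head_split (P : Nat → Bool) (a m h : Nat) (t : List Nat)
    (hf : (List.range' a m).filter P = h :: t) :
    t = (List.range' (h + 1) (a + m - (h + 1))).filter P := by
  have hmem : h ∈ (List.range' a m).filter P := by rw [hf]; exact List.mem_cons_self ..
  have hrng : h ∈ List.range' a m := (List.mem_filter.mp hmem).1
  have hb : a ≤ h ∧ h < a + m := by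
    have := List.mem_range'_1.mp hrng; omega
  have hsplit : List.range' a m
      = List.range' a (h - a) ++ h :: List.range' (h + 1) (a + m - (h + 1)) := by
    have h1 : List.range' a (h - a) ++ List.range' (a + (h - a)) (m - (h - a))
        = List.range' a m := by
      rw [List.range'_append_1]; congr 1; omega
    have h2 : a + (h - a) = h := by omega
    have h3 : m - (h - a) = (a + m - (h + 1)) + 1 := by omega
    rw [h2, h3, List.range'_succ] at h1
    exact h1.symm
  rw [hsplit, List.filter_append, List.filter_cons] at hf
  cases hfirst : (List.range' a (h - a)).filter P with
  | cons y ys =>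
    exfalso
    rw [hfirst] at hf
    have hy : y = h := by
      have := congrArg List.head? hf; simpa using this
    have hym : y ∈ (List.range' a (h - a)).filter P := by
      rw [hfirst]; exact List.mem_cons_self ..
    have := List.mem_range'_1.mp (List.mem_filter.mp hym).1
    omega
  | nil =>
    rw [hfirst] at hf
    by_cases hPh : P h = true
    · rw [if_pos hPh] at hf
      have h2 : (List.range' (h + 1) (a + m - (h + 1))).filter P = t := by simpa using hf
      exact h2.symm
    · rw [if_neg hPh] at hf
      exfalso
      have hhm : h ∈ (List.range' (h + 1) (a + m - (h + 1))).filter P := by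
        rw [show (List.range' (h + 1) (a + m - (h + 1))).filter P = h :: t by simpa using hf]
        exact List.mem_cons_self ..
      have := List.mem_range'_1.mp (List.mem_filter.mp hhm).1
      omega

-- A's outer loop from start yields exactly B's slices between the boundaries after start
theorem outerB (x wi : List Int) (start : Nat) (hs : start < x.length) :
    pyA_loop x wi x.length start
      = bSlices x (start :: ((List.range' (start + 1) (x.length - (start + 1))).filter (bP wi)) ++ [x.length]) := by
  unfold pyA_loop
  rw [dif_pos hs]
  have hinner := innerB wi x.length (wi.getD start 0) (start + 1) (by omega) (by omega)
    (by simp)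
  cases hF : (List.range' (start + 1) (x.length - (start + 1))).filter (bP wi) with
  | nil =>
    have he : pyA_inner wi x.length (wi.getD start 0) (start + 1) = x.length := by
      rw [hinner, hF]; rfl
    rw [he]
    unfold pyA_loop
    rw [dif_neg (by omega)]
    simp [bSlices]
  | cons h t =>
    have he : pyA_inner wi x.length (wi.getD start 0) (start + 1) = h := by
      rw [hinner, hF]; rfl
    have hmem : h ∈ List.range' (start + 1) (x.length - (start + 1)) := by
      have : h ∈ (List.range' (start + 1) (x.length - (start + 1))).filter (bP wi) := by
        rw [hF]; exact List.mem_cons_self ..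
      exact (List.mem_filter.mp this).1
    have hb : start + 1 ≤ h ∧ h < x.length := by
      have := List.mem_range'_1.mp hmem; omega
    have ht : t = (List.range' (h + 1) (x.length - (h + 1))).filter (bP wi) := by
      have := filter_head_split (bP wi) (start + 1) (x.length - (start + 1)) h t hF
      rw [this]; congr 1; congr 1; omega
    rw [he]
    have hrec := outerB x wi h hb.2
    rw [hrec, ← ht]
    simp [bSlices]
termination_by x.length - start
decreasing_by omega

-- ===== VERDICT =====
theorem iter_by_window_spec : Claim_equal_iter_by_window := by
  intro x wi? _ hpre
  unfold Spec_iter_by_window iter_by_window iter_by_window_alt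
  cases wi? with
  | none => rfl
  | some wi =>
    have hle : x.length ≤ wi.length := hpre wi rfl
    simp only []
    rw [if_neg (by omega), if_neg (by omega)]
    by_cases hn : x.length = 0
    · rw [if_pos hn]
      unfold pyA_loop
      rw [dif_neg (by omega)]
    · rw [if_neg hn]
      have := outerB x wi 0 (by omega)
      rw [this]
      unfold bBounds
      norm_num
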